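-- pv_equiv track=rewrite | github.com/takaramono77420/recursion_learning | Intermediate/List/associative array/characterLocation.py | characterLocation
-- ===== SOURCE A (Python) =====
-- def characterLocation(commands):
--     # 関数を完成させてください
--     direction = {
--         "N":{"x":0,"y":1},
--         "E":{"x":1,"y":0},
--         "W":{"x":-1,"y":0},
--         "S":{"x":0,"y":-1}
--     }
--
--     player_position = [0,0]
--
--     for command in commands:
--         if(command == "N" or command == "E" or command == "W" or command == "S"):
--             player_position[0] += direction[command]["x"]
--             player_position[1] += direction[command]["y"]
--
--     return player_position
-- ===== SOURCE B (Python) =====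
-- from collections import Counter
--
-- def characterLocation(commands):
--     c = Counter(commands)
--     return [c["E"] - c["W"], c["N"] - c["S"]]
-- ===== Notes on version B (the rewrite author's own statement) =====
-- stated objective: simpler
-- what changed: Replaced the accumulator loop with per-command branching by a Counter frequency table and a closed-form combination [E-W, N-S] of the counts.
import Mathlib
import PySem

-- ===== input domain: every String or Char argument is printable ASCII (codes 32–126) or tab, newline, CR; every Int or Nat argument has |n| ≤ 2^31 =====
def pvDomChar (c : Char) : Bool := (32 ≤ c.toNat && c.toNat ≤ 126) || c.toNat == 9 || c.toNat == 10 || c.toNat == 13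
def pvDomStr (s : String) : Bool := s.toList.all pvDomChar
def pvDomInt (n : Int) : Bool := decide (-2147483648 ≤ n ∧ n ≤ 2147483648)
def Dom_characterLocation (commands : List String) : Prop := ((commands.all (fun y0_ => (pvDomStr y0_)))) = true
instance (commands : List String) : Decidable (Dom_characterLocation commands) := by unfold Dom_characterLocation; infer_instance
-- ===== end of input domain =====

-- ===== PORT A =====
-- B replaces the per-command branch-and-accumulate loop by a Counter and a closed form [E-W, N-S].
-- direction dict of A, as an association list of association lists
def pvDirection : PySem.Dict String (PySem.Dict String Int) :=
  PySem.Dict.ofList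
    [("N", PySem.Dict.ofList [("x", 0), ("y", 1)]),
     ("E", PySem.Dict.ofList [("x", 1), ("y", 0)]),
     ("W", PySem.Dict.ofList [("x", -1), ("y", 0)]),
     ("S", PySem.Dict.ofList [("x", 0), ("y", -1)])]

def pvStep (p : Int × Int) (command : String) : Int × Int :=
  if command == "N" || command == "E" || command == "W" || command == "S" then
    (p.1 + ((PySem.Dict.get? pvDirection command).getD PySem.Dict.empty).getD "x" 0,
     p.2 + ((PySem.Dict.get? pvDirection command).getD PySem.Dict.empty).getD "y" 0)
  else p

def characterLocation (commands : List String) : List Int :=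
  let player_position : Int × Int := (0, 0)
  let p := commands.foldl pvStep player_position
  [p.1, p.2]

-- ===== PORT B =====
def characterLocation_alt (commands : List String) : List Int :=
  [((PySem.List.count commands "E") : Int) - PySem.List.count commands "W",
   ((PySem.List.count commands "N") : Int) - PySem.List.count commands "S"]

-- ===== PRECONDITION & SPEC =====
def Spec_characterLocation (commands : List String) (out : List Int) : Prop := out = characterLocation_alt commands
instance (commands : List String) (out : List Int) : Decidable (Spec_characterLocation commands out) := by unfold Spec_characterLocation; infer_instance

-- ===== CLAIM (what is proved, stated in full; the proofs are below) =====
def Claim_equal_characterLocation : Prop := ∀ (commands : List String), Dom_characterLocation commands → Spec_characterLocation commands (characterLocation commands)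

-- ===== LEMMAS AND PROOFS =====

-- ===== VERDICT (by name: the statement is the Claim_ definition above) =====
theorem pvStep_eval (p : Int × Int) (c : String) :
    pvStep p c =
      if c = "N" then (p.1, p.2 + 1)
      else if c = "E" then (p.1 + 1, p.2)
      else if c = "W" then (p.1 - 1, p.2)
      else if c = "S" then (p.1, p.2 - 1)
      else p := by
  by_cases hN : c = "N"
  · subst hN
    simp [pvStep, show ((PySem.Dict.get? pvDirection "N").getD PySem.Dict.empty).getD "x" 0 = 0 from by decide,
      show ((PySem.Dict.get? pvDirection "N").getD PySem.Dict.empty).getD "y" 0 = 1 from by decide]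
  · by_cases hE : c = "E"
    · subst hE
      simp [pvStep, hN, show ((PySem.Dict.get? pvDirection "E").getD PySem.Dict.empty).getD "x" 0 = 1 from by decide,
        show ((PySem.Dict.get? pvDirection "E").getD PySem.Dict.empty).getD "y" 0 = 0 from by decide]
    · by_cases hW : c = "W"
      · subst hW
        simp [pvStep, hN, hE, show ((PySem.Dict.get? pvDirection "W").getD PySem.Dict.empty).getD "x" 0 = -1 from by decide,
          show ((PySem.Dict.get? pvDirection "W").getD PySem.Dict.empty).getD "y" 0 = 0 from by decide]
        omega
      · by_cases hS : c = "S"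
        · subst hS
          simp [pvStep, hN, hE, hW, show ((PySem.Dict.get? pvDirection "S").getD PySem.Dict.empty).getD "x" 0 = 0 from by decide,
            show ((PySem.Dict.get? pvDirection "S").getD PySem.Dict.empty).getD "y" 0 = -1 from by decide]
          omega
        · simp [pvStep, hN, hE, hW, hS]

theorem pvLoop (commands : List String) (x y : Int) :
    commands.foldl pvStep (x, y)
    = (x + ((PySem.List.count commands "E" : Int) - PySem.List.count commands "W"),
       y + ((PySem.List.count commands "N" : Int) - PySem.List.count commands "S")) := by
  induction commands generalizing x y with
  | nil => simp [PySem.List.count]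
  | cons c cs ih =>
    rw [List.foldl_cons, pvStep_eval]
    by_cases hN : c = "N"
    · subst hN
      simp only [ih]
      simp [PySem.List.count]
      omega
    · by_cases hE : c = "E"
      · subst hE
        simp only [hN, ih, reduceIte]
        simp [PySem.List.count, List.count_cons, hN]
        omega
      · by_cases hW : c = "W"
        · subst hW
          simp only [hN, hE, ih, reduceIte]
          simp [PySem.List.count, List.count_cons, hN, hE]
          omega
        · by_cases hS : c = "S"
          · subst hS
            simp only [hN, hE, hW, ih, reduceIte]
            simp [PySem.List.count, List.count_cons, hN, hE, hW]
            omega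
          · simp only [hN, hE, hW, hS, ih, reduceIte]
            simp [PySem.List.count, List.count_cons, hN, hE, hW, hS]

theorem characterLocation_spec : Claim_equal_characterLocation := by
  intro commands _
  unfold Spec_characterLocation characterLocation characterLocation_alt
  simp only [pvLoop]
  simp
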